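/- GENERATED by tools/port_base_units.py: every unit statement of the base. -/
import ProgX.Base.Spec.Units.range_bad
import ProgX.Base.Spec.Units.asan_load1_noabort
import ProgX.Base.Spec.Units.asan_store1_noabort
import ProgX.Base.Spec.Units.asan_load2_noabort
import ProgX.Base.Spec.Units.asan_store2_noabort
import ProgX.Base.Spec.Units.asan_load4_noabort
import ProgX.Base.Spec.Units.asan_store4_noabort
import ProgX.Base.Spec.Units.asan_load8_noabort
import ProgX.Base.Spec.Units.asan_store8_noabort
import ProgX.Base.Spec.Units.asan_load16_noabort
import ProgX.Base.Spec.Units.asan_store16_noabort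
import ProgX.Base.Spec.Units.asan_storeN_noabort
import ProgX.Base.Spec.Units.arena_unpoison
import ProgX.Base.Spec.Units.arena_poison
import ProgX.Base.Spec.Units.swap_bytes
import ProgX.Base.Spec.Units.sift_down
import ProgX.Base.Spec.Units.memcpy
import ProgX.Base.Spec.Units.memset
import ProgX.Base.Spec.Units.memcmp
import ProgX.Base.Spec.Units.abs
import ProgX.Base.Spec.Units.qsort
import ProgX.Base.Spec.Units.two_to
import ProgX.Base.Spec.Units.pow_int
import ProgX.Base.Spec.Units.sin_poly
import ProgX.Base.Spec.Units.cos_poly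
import ProgX.Base.Spec.Units.ldexp
import ProgX.Base.Spec.Units.floor
import ProgX.Base.Spec.Units.sincos_quadrant
import ProgX.Base.Spec.Units.exp
import ProgX.Base.Spec.Units.log
import ProgX.Base.Spec.Units.pow
import ProgX.Base.Spec.Units.sin
import ProgX.Base.Spec.Units.cos
import ProgX.Base.Spec.Units.heap_product_ok
import ProgX.Base.Spec.Units.heap_live_size
import ProgX.Base.Spec.Units.heap_alloc
import ProgX.Base.Spec.Units.malloc
import ProgX.Base.Spec.Units.free
import ProgX.Base.Spec.Units.calloc
import ProgX.Base.Spec.Units.reallocarray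
import ProgX.Base.Spec.Units.realloc
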